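-- pv_equiv track=rewrite | github.com/sunilsoni/interview-notes-python | com/interview/2024/oct/RoundTripFlight.py | find_last_round_trip_time
-- ===== SOURCE A (Python) =====
-- import bisect
--
-- def find_last_round_trip_time(a2b, b2a, trips):
--     current_time = 0
--
--     for _ in range(trips):
--         # Find the next available flight from A to B
--         idx_a2b = bisect.bisect_left(a2b, current_time)
--         if idx_a2b == len(a2b):  # No more flights available
--             return -1
--         # Update the current time to when the flight lands at B
--         current_time = a2b[idx_a2b] + 100
--
--         # Find the next available flight from B to A
--         idx_b2a = bisect.bisect_left(b2a, current_time)
--         if idx_b2a == len(b2a):  # No more flights available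
--             return -1
--         # Update the current time to when the flight lands at A
--         current_time = b2a[idx_b2a] + 100
--
--     return current_time
-- ===== SOURCE B (Python) =====
-- import bisect
--
-- def find_last_round_trip_time(a2b, b2a, trips):
--     # The whole trip state is just current_time, and each trip maps it to a value
--     # from a finite set, so the sequence of trip-start times must either exhaust a
--     # schedule (-1) or enter a cycle; detect the cycle with a dict of first
--     # occurrences and fast-forward the remaining trips with modular arithmetic.
--     def step(ct):
--         i = bisect.bisect_left(a2b, ct)
--         if i == len(a2b):
--             return None
--         ct = a2b[i] + 100
--         j = bisect.bisect_left(b2a, ct)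
--         if j == len(b2a):
--             return None
--         return b2a[j] + 100
--     seen = {}
--     hist = [0]
--     ct = 0
--     t = 0
--     while t < trips:
--         if ct in seen:
--             s = seen[ct]
--             cycle = t - s
--             return hist[s + (trips - s) % cycle]
--         seen[ct] = t
--         nxt = step(ct)
--         if nxt is None:
--             return -1
--         ct = nxt
--         t += 1
--         hist.append(ct)
--     return ct
-- ===== Notes on version B (the rewrite author's own statement) =====
-- stated objective: alternative
-- what changed: Instead of blindly simulating every trip, B memoizes each trip-start time in a dict and, when a start time repeats (the whole loop state is just current_time, drawn from a finite set), fast-forwards the remaining trips with modular arithmetic over the detected cycle.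
import Mathlib
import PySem

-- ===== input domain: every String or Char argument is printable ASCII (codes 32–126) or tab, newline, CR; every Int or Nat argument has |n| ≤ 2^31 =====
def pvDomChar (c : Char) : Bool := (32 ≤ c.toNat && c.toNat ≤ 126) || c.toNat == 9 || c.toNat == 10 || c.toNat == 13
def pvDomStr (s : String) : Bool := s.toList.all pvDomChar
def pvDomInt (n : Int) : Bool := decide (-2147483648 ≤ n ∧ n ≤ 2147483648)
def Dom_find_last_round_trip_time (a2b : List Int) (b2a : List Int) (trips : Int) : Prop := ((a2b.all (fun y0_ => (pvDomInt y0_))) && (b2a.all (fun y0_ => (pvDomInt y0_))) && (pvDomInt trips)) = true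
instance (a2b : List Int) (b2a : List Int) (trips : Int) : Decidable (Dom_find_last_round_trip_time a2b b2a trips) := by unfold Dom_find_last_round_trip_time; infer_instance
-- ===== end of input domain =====

-- B replaces A's blind per-trip simulation by cycle detection on the trip-start time
-- (the whole loop state), fast-forwarding the remaining trips with modular
-- arithmetic once a start time repeats (objective: alternative algorithm).

-- ===== PORT A =====
-- bisect.bisect_left(a, x) with lo=0, hi=len(a): 'while lo < hi: mid=(lo+hi)//2; …'.
-- (fuel = hi bounds the number of iterations; the computation is Python's.
--  lo, hi stay in 0‥len(a), so a[mid] is always in range and getD is exact here.)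
def bisectGo (a : List Int) (x : Int) : Nat → Nat → Nat → Nat
  | 0, lo, _ => lo
  | fuel + 1, lo, hi =>
    if lo < hi then
      if a.getD ((lo + hi) / 2) 0 < x then bisectGo a x fuel ((lo + hi) / 2 + 1) hi
      else bisectGo a x fuel lo ((lo + hi) / 2)
    else lo

-- the 'for _ in range(trips)' loop of A (range(trips) runs max(trips,0) times)
def goA (a2b : List Int) (b2a : List Int) : Nat → Int → Int
  | 0, ct => ct
  | n + 1, ct =>
    let i := bisectGo a2b ct a2b.length 0 a2b.length
    if i = a2b.length then -1
    else
      let ct1 := a2b.getD i 0 + 100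
      let j := bisectGo b2a ct1 b2a.length 0 b2a.length
      if j = b2a.length then -1
      else goA a2b b2a n (b2a.getD j 0 + 100)

def find_last_round_trip_time (a2b : List Int) (b2a : List Int) (trips : Int) : Int :=
  goA a2b b2a trips.toNat 0

-- ===== PORT B =====
-- Source B's local 'step(ct)': one round trip, None when a schedule is exhausted
def stepB (a2b : List Int) (b2a : List Int) (ct : Int) : Option Int :=
  let i := bisectGo a2b ct a2b.length 0 a2b.length
  if i = a2b.length then none
  else
    let ct1 := a2b.getD i 0 + 100
    let j := bisectGo b2a ct1 b2a.length 0 b2a.length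
    if j = b2a.length then none
    else some (b2a.getD j 0 + 100)

-- Source B's 'while t < trips' loop; fuel n = trips - t counts the remaining trips.
-- 'hist[s + (trips - s) % cycle]': the index is provably a Nat in range (s comes
-- from the dict of first occurrences), so getD/.toNat is exact on reachable states.
def loopB (a2b : List Int) (b2a : List Int) (trips : Int) :
    Nat → Nat → Int → PySem.Dict Int Int → List Int → Int
  | 0, _, ct, _, _ => ct
  | n + 1, t, ct, seen, hist =>
    match seen.get? ct with
    | some s =>
      let cycle : Int := (t : Int) - s
      hist.getD (s + PySem.Int.mod ((trips : Int) - s) cycle).toNat 0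
    | none =>
      match stepB a2b b2a ct with
      | none => -1
      | some nxt => loopB a2b b2a trips n (t + 1) nxt (seen.insert ct (t : Int)) (hist ++ [nxt])

def find_last_round_trip_time_alt (a2b : List Int) (b2a : List Int) (trips : Int) : Int :=
  loopB a2b b2a trips trips.toNat 0 0 PySem.Dict.empty [0]

-- ===== PRECONDITION & SPEC =====
def Spec_find_last_round_trip_time (a2b : List Int) (b2a : List Int) (trips : Int) (out : Int) : Prop := out = find_last_round_trip_time_alt a2b b2a trips
instance (a2b : List Int) (b2a : List Int) (trips : Int) (out : Int) : Decidable (Spec_find_last_round_trip_time a2b b2a trips out) := by unfold Spec_find_last_round_trip_time; infer_instance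

-- ===== CLAIM (what is proved, stated in full; the proofs are below) =====
def Claim_equal_find_last_round_trip_time : Prop := ∀ (a2b : List Int) (b2a : List Int) (trips : Int), Dom_find_last_round_trip_time a2b b2a trips → Spec_find_last_round_trip_time a2b b2a trips (find_last_round_trip_time a2b b2a trips)

-- ===== LEMMAS AND PROOFS =====

-- one trip of A's loop is exactly stepB
theorem goA_succ (a2b b2a : List Int) (n : Nat) (ct : Int) :
    goA a2b b2a (n + 1) ct =
      match stepB a2b b2a ct with
      | none => -1
      | some c => goA a2b b2a n c := by
  simp only [goA, stepB]
  split_ifs <;> rfl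

-- small getD-on-snoc helpers
theorem getD_snoc_lt (l : List Int) (x : Int) (k : Nat) (h : k < l.length) :
    (l ++ [x]).getD k 0 = l.getD k 0 := by
  simp [List.getD, List.getElem?_append_left h]

theorem getD_snoc_self (l : List Int) (x : Int) :
    (l ++ [x]).getD l.length 0 = x := by
  simp [List.getD]

-- the chain property: hist lists successive trip-start times under stepB
theorem goA_shift (a2b b2a : List Int) (hist : List Int)
    (hch : ∀ k, k + 1 < hist.length →
      stepB a2b b2a (hist.getD k 0) = some (hist.getD (k + 1) 0)) :
    ∀ (j s r : Nat), s + j + 1 ≤ hist.length →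
      goA a2b b2a (j + r) (hist.getD s 0) = goA a2b b2a r (hist.getD (s + j) 0) := by
  intro j
  induction j with
  | zero => intro s r _; simp
  | succ i ih =>
    intro s r hlen
    have h1 : s + 1 < hist.length := by omega
    have h2 : i + 1 + r = (i + r) + 1 := by omega
    rw [h2, goA_succ, hch s h1]
    dsimp only
    rw [ih (s + 1) r (by omega)]
    have h3 : s + 1 + i = s + (i + 1) := by omega
    rw [h3]

theorem goA_run (a2b b2a : List Int) (hist : List Int)
    (hch : ∀ k, k + 1 < hist.length →
      stepB a2b b2a (hist.getD k 0) = some (hist.getD (k + 1) 0))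
    (j s : Nat) (hlen : s + j + 1 ≤ hist.length) :
    goA a2b b2a j (hist.getD s 0) = hist.getD (s + j) 0 := by
  have := goA_shift a2b b2a hist hch j s 0 hlen
  simpa [goA] using this

theorem goA_period (a2b b2a : List Int) (hist : List Int)
    (hch : ∀ k, k + 1 < hist.length →
      stepB a2b b2a (hist.getD k 0) = some (hist.getD (k + 1) 0))
    (s d : Nat) (hd : 0 < d) (hsd : s + d + 1 ≤ hist.length)
    (hcy : hist.getD s 0 = hist.getD (s + d) 0) :
    ∀ m, goA a2b b2a m (hist.getD s 0) = goA a2b b2a (m % d) (hist.getD s 0) := by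
  intro m
  induction m using Nat.strong_induction_on with
  | _ m ih =>
    rcases Nat.lt_or_ge m d with hm | hm
    · rw [Nat.mod_eq_of_lt hm]
    · have h2 : goA a2b b2a m (hist.getD s 0) = goA a2b b2a (m - d) (hist.getD s 0) := by
        conv_lhs => rw [show m = d + (m - d) by omega]
        rw [goA_shift a2b b2a hist hch d s (m - d) hsd, ← hcy]
      rw [h2, ih (m - d) (by omega), Nat.mod_eq_sub_mod hm]

-- the main loop invariant: B's loop computes exactly A's remaining simulation
theorem loopB_eq (a2b b2a : List Int) (trips : Int) :
    ∀ (n t : Nat) (ct : Int) (seen : PySem.Dict Int Int) (hist : List Int),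
      hist.length = t + 1 →
      hist.getD t 0 = ct →
      (∀ k, k + 1 < hist.length →
        stepB a2b b2a (hist.getD k 0) = some (hist.getD (k + 1) 0)) →
      (∀ x s, seen.get? x = some s → ∃ k : Nat, (k : Int) = s ∧ k < t ∧ hist.getD k 0 = x) →
      n + t = trips.toNat →
      goA a2b b2a n ct = loopB a2b b2a trips n t ct seen hist := by
  intro n
  induction n with
  | zero => intro t ct seen hist _ _ _ _ _; simp [goA, loopB]
  | succ m ih =>
    intro t ct seen hist hlen hlast hch hseen htr
    cases hget : seen.get? ct with
    | some s =>
      obtain ⟨k, hks, hkt, hkc⟩ := hseen ct s hget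
      simp only [loopB, hget]
      -- the cycle length d and the integer arithmetic of the fast-forward index
      set d : Nat := t - k with hddef
      have hd : 0 < d := by omega
      have htrpos : 0 ≤ trips := by
        by_contra h
        have : trips.toNat = 0 := by omega
        omega
      have htripsInt : (trips : Int) = ((m + 1 + t : Nat) : Int) := by
        have : trips.toNat = m + 1 + t := by omega
        omega
      have hcycle : (t : Int) - s = (d : Int) := by
        rw [← hks]; omega
      have hmodarg : (trips : Int) - s = ((m + 1 + d : Nat) : Int) := by
        rw [← hks, htripsInt]; push_cast; omega
      have hmod : PySem.Int.mod ((trips : Int) - s) ((t : Int) - s)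
          = (((m + 1) % d : Nat) : Int) := by
        rw [hcycle, hmodarg, PySem.Int.mod_eq_emod_of_pos (by exact_mod_cast hd)]
        have : ((m + 1 + d : Nat) : Int) % (d : Int) = (((m + 1 + d) % d : Nat) : Int) := by
          push_cast; ring_nf
        rw [this, Nat.add_mod_right]
      have hidx : (s + PySem.Int.mod ((trips : Int) - s) ((t : Int) - s)).toNat
          = k + (m + 1) % d := by
        rw [hmod, ← hks]
        have hcast : ((k : Int) + (((m + 1) % d : Nat) : Int)) = (((k + (m + 1) % d : Nat)) : Int) := by
          push_cast; ring
        rw [hcast, Int.toNat_natCast]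
      rw [hidx]
      -- A's side: periodicity of the simulation from the repeated start time
      have hcy : hist.getD k 0 = hist.getD (k + d) 0 := by
        have : k + d = t := by omega
        rw [this, hlast, hkc]
      have hper := goA_period a2b b2a hist hch k d hd (by omega) hcy (m + 1)
      have hrun := goA_run a2b b2a hist hch ((m + 1) % d) k
        (by have := Nat.mod_lt (m + 1) hd; omega)
      rw [← hlast]
      have hct : hist.getD t 0 = hist.getD k 0 := by rw [hlast, hkc]
      rw [hct, hper, hrun]
    | none =>
      simp only [loopB, hget]
      rw [goA_succ]
      cases hstep : stepB a2b b2a ct with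
      | none => rfl
      | some nxt =>
        refine ih (t + 1) nxt (seen.insert ct (t : Int)) (hist ++ [nxt]) ?_ ?_ ?_ ?_ (by omega)
        · simp [hlen]
        · have : hist.length = t + 1 := hlen
          rw [show t + 1 = hist.length from this.symm, getD_snoc_self]
        · intro k hk
          simp only [List.length_append, List.length_cons, List.length_nil] at hk
          rcases Nat.lt_or_ge (k + 1) hist.length with h' | h'
          · rw [getD_snoc_lt _ _ _ (by omega), getD_snoc_lt _ _ _ h']
            exact hch k h'
          · have hk1 : k + 1 = hist.length := by omega
            have hkt : k = t := by omega
            rw [getD_snoc_lt _ _ _ (by omega), hk1, getD_snoc_self, hkt, hlast, hstep]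
        · intro x s hx
          rw [PySem.Dict.get?_insert] at hx
          by_cases hxc : x = ct
          · rw [if_pos hxc] at hx
            refine ⟨t, by simpa using hx, by omega, ?_⟩
            rw [hxc, getD_snoc_lt _ _ _ (by omega), hlast]
          · rw [if_neg hxc] at hx
            obtain ⟨k, hks, hkt, hkc⟩ := hseen x s hx
            exact ⟨k, hks, by omega, by rw [getD_snoc_lt _ _ _ (by omega)]; exact hkc⟩

-- ===== VERDICT (by name: the statement is the Claim_ definition above) =====
theorem find_last_round_trip_time_spec : Claim_equal_find_last_round_trip_time := by
  intro a2b b2a trips _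
  unfold Spec_find_last_round_trip_time find_last_round_trip_time find_last_round_trip_time_alt
  refine loopB_eq a2b b2a trips trips.toNat 0 0 PySem.Dict.empty [0] rfl rfl ?_ ?_ rfl
  · intro k hk; simp at hk
  · intro x s hx; simp [PySem.Dict.get?_empty] at hx
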